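-- pv_equiv track=rewrite | github.com/anhnda/ViBenchMark | build_vi_benchmark.py | build_continuous_stream
-- ===== SOURCE A (Python) =====
-- def build_continuous_stream(paragraphs: list[str], target_chars: int, sep: str = "\n\n") -> str:
--     """
--     Ghép các đoạn văn thành một luồng văn bản liên tục.
--     Cắt tại ranh giới đoạn văn gần nhất với target_chars.
--     """
--     stream_parts = []
--     total = 0
--     for para in paragraphs:
--         stream_parts.append(para)
--         total += len(para) + len(sep)
--         if total >= target_chars:
--             break
--
--     return sep.join(stream_parts)
-- ===== SOURCE B (Python) =====
-- def build_continuous_stream(paragraphs: list[str], target_chars: int, sep: str = "\n\n") -> str: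
--     if not paragraphs:
--         return ""
--     totals = []
--     running = 0
--     for p in paragraphs:
--         running += len(p) + len(sep)
--         totals.append(running)
--     cut = next((i for i, s in enumerate(totals) if s >= target_chars),
--                len(paragraphs) - 1)
--     return sep.join(paragraphs[:cut + 1])
-- ===== Notes on version B (the rewrite author's own statement) =====
-- stated objective: alternative
-- what changed: Replaces A's single accumulate-and-break loop by a table-based decomposition: build the running-total table of per-paragraph increments, locate the first index whose total reaches target_chars (defaulting to the last index), then slice and join.
import Mathlib
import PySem

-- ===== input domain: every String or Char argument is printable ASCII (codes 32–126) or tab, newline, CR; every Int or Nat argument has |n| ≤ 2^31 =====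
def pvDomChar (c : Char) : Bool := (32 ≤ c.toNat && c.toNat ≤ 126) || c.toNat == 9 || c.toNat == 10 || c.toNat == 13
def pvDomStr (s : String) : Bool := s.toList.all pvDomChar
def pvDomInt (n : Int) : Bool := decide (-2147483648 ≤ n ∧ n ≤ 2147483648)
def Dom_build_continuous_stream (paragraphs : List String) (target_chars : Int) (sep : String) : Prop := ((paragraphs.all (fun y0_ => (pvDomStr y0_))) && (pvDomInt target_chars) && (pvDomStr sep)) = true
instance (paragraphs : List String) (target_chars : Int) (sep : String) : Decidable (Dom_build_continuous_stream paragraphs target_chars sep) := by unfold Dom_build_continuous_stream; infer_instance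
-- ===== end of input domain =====

-- B rebuilds the prefix with a running-total table, a first-hit index search and a slice
-- instead of A's accumulate-and-break loop (objective: alternative decomposition, same cost).

-- ===== PORT A =====
-- A's loop: append para, add len(para)+len(sep) to total, break once total >= target_chars.
def bcsA_loop (sep : String) (target : Int) : List String → Int → List String
  | [], _ => []
  | p :: rest, total =>
    let total' := total + PySem.Str.len p + PySem.Str.len sep
    if target ≤ total' then [p]
    else p :: bcsA_loop sep target rest total'

def build_continuous_stream (paragraphs : List String) (target_chars : Int) (sep : String) : String :=
  PySem.Str.join sep (bcsA_loop sep target_chars paragraphs 0)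

-- ===== PORT B =====
-- Source B's totals-table loop: running totals of len(p)+len(sep).
def bcsB_totals (sepLen : Int) : List String → Int → List Int
  | [], _ => []
  | p :: rest, running =>
    let r' := running + PySem.Str.len p + sepLen
    r' :: bcsB_totals sepLen rest r'

def build_continuous_stream_alt (paragraphs : List String) (target_chars : Int) (sep : String) : String :=
  if paragraphs = [] then ""
  else
    let totals := bcsB_totals (PySem.Str.len sep) paragraphs 0
    let cut : Nat := (totals.findIdx? (fun s => target_chars ≤ s)).getD (paragraphs.length - 1)
    PySem.Str.join sep (PySem.List.slice paragraphs none (some ((cut : Int) + 1)))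

-- ===== PRECONDITION & SPEC =====
def Spec_build_continuous_stream (paragraphs : List String) (target_chars : Int) (sep : String) (out : String) : Prop := out = build_continuous_stream_alt paragraphs target_chars sep
instance (paragraphs : List String) (target_chars : Int) (sep : String) (out : String) : Decidable (Spec_build_continuous_stream paragraphs target_chars sep out) := by unfold Spec_build_continuous_stream; infer_instance

-- ===== CLAIM (what is proved, stated in full; the proofs are below) =====
def Claim_equal_build_continuous_stream : Prop := ∀ (paragraphs : List String) (target_chars : Int) (sep : String), Dom_build_continuous_stream paragraphs target_chars sep → Spec_build_continuous_stream paragraphs target_chars sep (build_continuous_stream paragraphs target_chars sep)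

-- ===== LEMMAS AND PROOFS =====

-- A's break-loop output is the take-prefix B computes from its totals table.
lemma bcs_loop_eq_take (t : Int) (sep : String) :
    ∀ (ps : List String) (tot : Int), ps ≠ [] →
      bcsA_loop sep t ps tot =
        ps.take ((((bcsB_totals (PySem.Str.len sep) ps tot).findIdx?
          (fun s => t ≤ s)).getD (ps.length - 1)) + 1) := by
  intro ps
  induction ps with
  | nil => intro tot h; exact absurd rfl h
  | cons p rest ih =>
    intro tot _
    simp only [bcsA_loop, bcsB_totals, List.findIdx?_cons, PySem.Str.len_eq,
      String.length_toList, decide_eq_true_eq]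
    by_cases h : t ≤ tot + (p.length : Int) + (sep.length : Int)
    · simp [h]
    · rw [if_neg h, if_neg h]
      rcases List.eq_nil_or_concat rest with hrest | ⟨_, _, hne⟩
      · subst hrest; simp [bcsA_loop, bcsB_totals]
      · have hne' : rest ≠ [] := by simp [hne]
        rw [show bcsA_loop sep t rest (tot + (p.length : Int) + (sep.length : Int)) = _ from
          ih _ hne']
        cases hfi : (bcsB_totals ((sep.length : Int)) rest
            (tot + (p.length : Int) + (sep.length : Int))).findIdx? (fun s => t ≤ s) with
        | none =>
          have hlen : 0 < rest.length := List.length_pos_iff.mpr hne'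
          simp [hfi, List.take_succ_cons]
          omega
        | some j => simp [hfi, List.take_succ_cons]

-- ===== VERDICT (by name: the statement is the Claim_ definition above) =====
theorem build_continuous_stream_spec : Claim_equal_build_continuous_stream := by
  intro paragraphs target_chars sep _
  unfold Spec_build_continuous_stream build_continuous_stream build_continuous_stream_alt
  by_cases hps : paragraphs = []
  · subst hps; simp [bcsA_loop, PySem.Str.join]
  · simp only [hps, if_false]
    rw [bcs_loop_eq_take target_chars sep paragraphs 0 hps]
    congr 1
    have : ((((bcsB_totals (PySem.Str.len sep) paragraphs 0).findIdx?
        (fun s => target_chars ≤ s)).getD (paragraphs.length - 1) : Int) + 1)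
        = ((((bcsB_totals (PySem.Str.len sep) paragraphs 0).findIdx?
        (fun s => target_chars ≤ s)).getD (paragraphs.length - 1) + 1 : Nat) : Int) := by
      push_cast; ring
    rw [this, PySem.List.slice_to_natCast]
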